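-- pv_equiv track=rewrite | github.com/Coder-DarkSlayer/Oceanverse | Q57.py | positive
-- ===== SOURCE A (Python) =====
-- def positive(arr): # largest positive sum
--     x = True # flag
--     temp = 0 # temporary variable
--     for i in arr: # we check each element in list
--         if i < 0: # if any element is negative
--             x = False # flag is false
--             break # break loop
--         elif i > temp: # if element is greater than temporary variable
--             temp = i # assign element to temporary variable
--     return temp,x # return temporary variable and flag
-- ===== SOURCE B (Python) =====
-- def positive(arr):
--     idx = next((k for k, v in enumerate(arr) if v < 0), None)
--     prefix = arr if idx is None else arr[:idx]
--     return (max(prefix, default=0), idx is None)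
-- ===== Notes on version B (the rewrite author's own statement) =====
-- stated objective: simpler
-- what changed: Replaced the break-loop carrying a running max and flag with a find-first-negative search followed by max(prefix, default=0) over the slice before that index.
import Mathlib
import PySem

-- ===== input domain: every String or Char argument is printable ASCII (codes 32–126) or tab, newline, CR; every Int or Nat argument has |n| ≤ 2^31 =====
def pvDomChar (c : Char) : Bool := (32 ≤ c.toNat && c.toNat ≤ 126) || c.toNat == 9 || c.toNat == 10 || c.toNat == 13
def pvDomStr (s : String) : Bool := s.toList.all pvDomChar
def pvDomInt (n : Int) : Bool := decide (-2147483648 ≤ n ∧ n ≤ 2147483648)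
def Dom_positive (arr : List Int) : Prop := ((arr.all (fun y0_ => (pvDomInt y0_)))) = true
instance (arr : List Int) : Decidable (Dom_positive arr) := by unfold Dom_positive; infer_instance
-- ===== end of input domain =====

-- B replaces A's break-loop with find-first-negative + max over the prefix slice (objective: simpler decomposition).

-- ===== PORT A =====
-- the for-loop with break, state (temp, flag)
def positiveLoop (arr : List Int) (temp : Int) : Int × Bool :=
  match arr with
  | [] => (temp, true)
  | i :: rest =>
    if i < 0 then (temp, false)
    else if i > temp then positiveLoop rest i
    else positiveLoop rest temp

def positive (arr : List Int) : Int × Bool := positiveLoop arr 0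

-- ===== PORT B =====
def positive_alt (arr : List Int) : Int × Bool :=
  match arr.findIdx? (fun v => decide (v < 0)) with
  | none => ((PySem.List.max? arr (fun y => y)).getD 0, true)
  | some k => ((PySem.List.max? (arr.take k) (fun y => y)).getD 0, false)

-- ===== PRECONDITION & SPEC =====
def Spec_positive (arr : List Int) (out : Int × Bool) : Prop := out = positive_alt arr
instance (arr : List Int) (out : Int × Bool) : Decidable (Spec_positive arr out) := by unfold Spec_positive; infer_instance

-- ===== CLAIM (what is proved, stated in full; the proofs are below) =====
def Claim_equal_positive : Prop := ∀ (arr : List Int), Dom_positive arr → Spec_positive arr (positive arr)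

-- ===== LEMMAS AND PROOFS =====

-- common reference form: foldl max over the prefix before the first negative
def refForm (arr : List Int) (temp : Int) : Int × Bool :=
  match arr.findIdx? (fun v => decide (v < 0)) with
  | none => (arr.foldl max temp, true)
  | some k => ((arr.take k).foldl max temp, false)

lemma loop_eq_ref (arr : List Int) : ∀ temp : Int, positiveLoop arr temp = refForm arr temp := by
  induction arr with
  | nil => intro temp; simp [positiveLoop, refForm]
  | cons i rest ih =>
    intro temp
    by_cases hneg : i < 0
    · simp [positiveLoop, refForm, hneg, List.findIdx?_cons]
    · have step : positiveLoop (i :: rest) temp = positiveLoop rest (max temp i) := by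
        simp only [positiveLoop, if_neg hneg]
        split_ifs with h
        · congr 1; omega
        · congr 1; omega
      rw [step, ih]
      simp only [refForm, List.findIdx?_cons, decide_eq_true_eq, if_neg hneg]
      cases hfi : rest.findIdx? (fun v => decide (v < 0)) with
      | none => simp [List.foldl_cons]
      | some k => simp [List.take_succ_cons, List.foldl_cons]

lemma findIdx?_none_nonneg (arr : List Int)
    (h : arr.findIdx? (fun v => decide (v < 0)) = none) : ∀ x ∈ arr, 0 ≤ x := by
  induction arr with
  | nil => simp
  | cons i rest ih =>
    simp only [List.findIdx?_cons] at h
    by_cases hneg : i < 0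
    · simp [hneg] at h
    · intro x hx
      rcases List.mem_cons.mp hx with rfl | hx
      · exact not_lt.mp hneg
      · exact ih (by simpa [hneg] using h) x hx

lemma findIdx?_some_take_nonneg (arr : List Int) : ∀ k : Nat,
    arr.findIdx? (fun v => decide (v < 0)) = some k → ∀ x ∈ arr.take k, 0 ≤ x := by
  induction arr with
  | nil => simp
  | cons i rest ih =>
    intro k h
    simp only [List.findIdx?_cons] at h
    by_cases hneg : i < 0
    · simp [hneg] at h; simp [← h]
    · cases hfi : rest.findIdx? (fun v => decide (v < 0)) with
      | none => rw [hfi] at h; simp [hneg] at h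
      | some k' =>
        rw [hfi] at h
        simp [hneg] at h
        intro x hx
        rw [← h, List.take_succ_cons] at hx
        rcases List.mem_cons.mp hx with rfl | hx
        · exact not_lt.mp hneg
        · exact ih k' hfi x hx

-- max(l, default=0) = foldl max 0 l when every element of l is nonnegative
lemma maxD_eq_foldl (l : List Int) (h : ∀ x ∈ l, 0 ≤ x) :
    (PySem.List.max? l (fun y => y)).getD 0 = l.foldl max 0 := by
  cases l with
  | nil => simp [PySem.List.max?]
  | cons x t =>
    rw [PySem.List.max?_id_cons]
    have hx : max 0 x = x := max_eq_right (h x (by simp))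
    simp [List.foldl_cons, hx]

lemma alt_eq_ref (arr : List Int) : positive_alt arr = refForm arr 0 := by
  unfold positive_alt refForm
  cases hfi : arr.findIdx? (fun v => decide (v < 0)) with
  | none => simp [maxD_eq_foldl arr (findIdx?_none_nonneg arr hfi)]
  | some k => simp [maxD_eq_foldl (arr.take k) (findIdx?_some_take_nonneg arr k hfi)]

-- ===== VERDICT (by name: the statement is the Claim_ definition above) =====
theorem positive_spec : Claim_equal_positive := by
  intro arr _
  unfold Spec_positive positive
  rw [loop_eq_ref, alt_eq_ref]
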